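-- pv_equiv track=rewrite | github.com/IanCBrown/practice_questions | greedilyincreasing.py | greedy
-- ===== SOURCE A (Python) =====
-- def greedy(sequence):
--     max = sequence[0]
--     max_sequence = []
--     max_sequence.append(max)
--     for num in sequence:
--         if num > max:
--             max = num
--             max_sequence.append(num)
--     return max_sequence
-- ===== SOURCE B (Python) =====
-- def greedy(sequence):
--     # pass 1: materialize the prefix-maximum table
--     running = []
--     m = sequence[0]
--     for x in sequence:
--         if x > m:
--             m = x
--         running.append(m)
--     # pass 2: scan the table; emit each strict increase between consecutive entries
--     return [running[0]] + [b for a, b in zip(running, running[1:]) if b > a]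
-- ===== Notes on version B (the rewrite author's own statement) =====
-- stated objective: alternative
-- what changed: B first materializes the prefix-maximum table in one pass, then produces the output by a second pass comparing consecutive table entries, instead of A's single loop that tracks and appends new maxima inline.
-- outside the precondition, e.g. on greedy([]): A raises IndexError, B raises IndexError
import Mathlib
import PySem

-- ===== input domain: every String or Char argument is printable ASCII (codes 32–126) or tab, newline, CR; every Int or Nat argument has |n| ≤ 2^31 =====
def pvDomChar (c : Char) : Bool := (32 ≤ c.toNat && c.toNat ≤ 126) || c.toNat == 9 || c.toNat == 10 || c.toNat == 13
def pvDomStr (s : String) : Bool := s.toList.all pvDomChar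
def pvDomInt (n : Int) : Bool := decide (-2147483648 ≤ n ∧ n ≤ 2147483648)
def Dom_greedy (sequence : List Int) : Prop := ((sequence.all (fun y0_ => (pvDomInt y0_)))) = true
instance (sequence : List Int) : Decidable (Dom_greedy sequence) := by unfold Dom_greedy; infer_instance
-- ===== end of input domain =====

-- B replaces A's single inline-tracking loop by two passes: build the prefix-maximum
-- table, then emit each strict increase between consecutive table entries (alternative
-- decomposition, same cost; return-value equivalence only).

-- ===== PORT A =====
def greedy (sequence : List Int) : List Int :=
  match PySem.List.pyGet? sequence 0 with
  | none => []   -- IndexError in Python; excluded by Pre_greedy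
  | some mx =>
    (sequence.foldl
      (fun (st : Int × List Int) num =>
        if num > st.1 then (num, st.2 ++ [num]) else st)
      (mx, [mx])).2

-- ===== PORT B =====
def greedy_alt (sequence : List Int) : List Int :=
  match PySem.List.pyGet? sequence 0 with
  | none => []   -- IndexError in Python; excluded by Pre_greedy
  | some m0 =>
    let running := (sequence.foldl
      (fun (st : Int × List Int) x =>
        let m := if x > st.1 then x else st.1
        (m, st.2 ++ [m]))
      (m0, [])).2
    match running with
    | [] => []   -- unreachable: running has one entry per element of sequence
    | r0 :: _ =>
      r0 :: (running.zip running.tail).filterMap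
        (fun p => if p.2 > p.1 then some p.2 else none)

-- ===== PRECONDITION & SPEC =====
-- Pre_ excludes only the empty list, on which Python A raises IndexError (sequence[0]).
def Pre_greedy (sequence : List Int) : Prop := sequence ≠ []
instance (sequence : List Int) : Decidable (Pre_greedy sequence) := by unfold Pre_greedy; infer_instance
def pvWitness_greedy : List Int := [3, 1, 4, 1, 5]

def Spec_greedy (sequence : List Int) (out : List Int) : Prop := out = greedy_alt sequence
instance (sequence : List Int) (out : List Int) : Decidable (Spec_greedy sequence out) := by unfold Spec_greedy; infer_instance

-- ===== CLAIM (what is proved, stated in full; the proofs are below) =====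
def Claim_equal_greedy : Prop := ∀ (sequence : List Int), Dom_greedy sequence → Pre_greedy sequence → Spec_greedy sequence (greedy sequence)

-- ===== LEMMAS AND PROOFS =====

-- the new strict maxima emitted while scanning l with current maximum m (A's appends)
def stepsF (m : Int) : List Int → List Int
  | [] => []
  | x :: xs => if x > m then x :: stepsF x xs else stepsF m xs

-- the prefix-maximum table over l with current maximum m (B's `running`)
def pmaxF (m : Int) : List Int → List Int
  | [] => []
  | x :: xs => (if x > m then x else m) :: pmaxF (if x > m then x else m) xs

-- B's second pass over a table r
def zf (r : List Int) : List Int :=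
  (r.zip r.tail).filterMap (fun p => if p.2 > p.1 then some p.2 else none)

theorem foldA_eq (l : List Int) : ∀ (m : Int) (acc : List Int),
    (l.foldl (fun (st : Int × List Int) num =>
        if num > st.1 then (num, st.2 ++ [num]) else st) (m, acc)).2
      = acc ++ stepsF m l := by
  induction l with
  | nil => intro m acc; simp [stepsF]
  | cons x xs ih =>
    intro m acc
    by_cases h : x > m <;> simp [List.foldl, h, stepsF, ih]

theorem foldB_eq (l : List Int) : ∀ (m : Int) (acc : List Int),
    (l.foldl (fun (st : Int × List Int) x =>
        let mm := if x > st.1 then x else st.1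
        (mm, st.2 ++ [mm])) (m, acc)).2
      = acc ++ pmaxF m l := by
  induction l with
  | nil => intro m acc; simp [pmaxF]
  | cons x xs ih =>
    intro m acc
    simp only [List.foldl, pmaxF, ih]
    simp

theorem zf_pmax (l : List Int) : ∀ (m : Int), zf (m :: pmaxF m l) = stepsF m l := by
  induction l with
  | nil => intro m; simp [zf, pmaxF, stepsF]
  | cons x xs ih =>
    intro m
    by_cases h : x > m
    · simp only [pmaxF, if_pos h, stepsF]
      have := ih x
      simp only [zf, List.zip, List.zipWith, List.tail, List.filterMap] at this ⊢
      simp [this, h]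
    · simp only [pmaxF, if_neg h, stepsF]
      have := ih m
      simp only [zf, List.zip, List.zipWith, List.tail, List.filterMap] at this ⊢
      simp [this]

-- ===== VERDICT (by name: the statement is the Claim_ definition above) =====
theorem greedy_spec : Claim_equal_greedy := by
  intro sequence _ hpre
  obtain ⟨s0, rest, rfl⟩ : ∃ a l, sequence = a :: l := by
    cases sequence with
    | nil => exact absurd rfl hpre
    | cons a l => exact ⟨a, l, rfl⟩
  have hget : PySem.List.pyGet? (s0 :: rest) (0 : Int) = some s0 := by
    simp [PySem.List.pyGet?, PySem.List.pyIdx?]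
  unfold Spec_greedy greedy greedy_alt
  rw [hget]
  simp only [List.foldl_cons, if_neg (lt_irrefl s0), List.nil_append]
  rw [foldA_eq rest s0 [s0], foldB_eq rest s0 [s0]]
  have hz := zf_pmax rest s0
  simp only [zf, List.tail_cons, List.zip] at hz
  simp only [List.singleton_append, List.tail_cons, List.zip]
  rw [hz]
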